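-- pv_equiv track=rewrite | github.com/y55mun/codeTest | programmers/lv0/4.py | solution
-- ===== SOURCE A (Python) =====
-- def solution(n):
--     answer = 0
--
--     if n % 2 != 0:
--         n = [i for i in range(1, n + 1) if i % 2 != 0]
--         return sum(n)
--     else:
--         n = [i ** 2 for i in range(1, n + 1) if i % 2 == 0]
--         return sum(n)
-- ===== SOURCE B (Python) =====
-- def solution(n):
--     if n <= 0:
--         return 0
--     if n % 2:
--         k = (n + 1) // 2
--         return k * k
--     k = n // 2
--     return 2 * k * (k + 1) * (2 * k + 1) // 3
-- ===== Notes on version B (the rewrite author's own statement) =====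
-- stated objective: faster
-- what changed: Replaced the O(n) list-comprehension-and-sum with O(1) closed-form arithmetic: k^2 for the odd-sum branch and the square-pyramidal formula 2k(k+1)(2k+1)/3 for the even-squares branch.
import Mathlib
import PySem

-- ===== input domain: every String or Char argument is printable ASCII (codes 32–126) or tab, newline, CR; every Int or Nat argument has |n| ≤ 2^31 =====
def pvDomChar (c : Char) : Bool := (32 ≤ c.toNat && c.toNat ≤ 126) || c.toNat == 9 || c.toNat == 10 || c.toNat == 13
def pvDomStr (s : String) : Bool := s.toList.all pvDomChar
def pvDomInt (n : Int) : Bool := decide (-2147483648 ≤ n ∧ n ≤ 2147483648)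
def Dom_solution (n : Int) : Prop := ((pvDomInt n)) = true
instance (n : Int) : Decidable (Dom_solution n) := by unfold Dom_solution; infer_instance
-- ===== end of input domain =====

-- B replaces A's O(n) range/filter/sum loops by O(1) closed-form formulas (k^2, square-pyramidal).


-- ===== PORT A =====
def solution (n : Int) : Int :=
  if PySem.Int.mod n 2 != 0 then
    ((PySem.List.pyRange 1 (n + 1) 1).filter (fun i => PySem.Int.mod i 2 != 0)).sum
  else
    (((PySem.List.pyRange 1 (n + 1) 1).filter (fun i => PySem.Int.mod i 2 == 0)).map
      (fun i => i ^ 2)).sum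

-- ===== PORT B =====
def solution_alt (n : Int) : Int :=
  if n ≤ 0 then 0
  else if PySem.Int.mod n 2 != 0 then
    let k := PySem.Int.floordiv (n + 1) 2
    k * k
  else
    let k := PySem.Int.floordiv n 2
    PySem.Int.floordiv (2 * k * (k + 1) * (2 * k + 1)) 3

-- ===== PRECONDITION & SPEC =====
def Spec_solution (n : Int) (out : Int) : Prop := out = solution_alt n
instance (n : Int) (out : Int) : Decidable (Spec_solution n out) := by unfold Spec_solution; infer_instance

-- ===== CLAIM (what is proved, stated in full; the proofs are below) =====
def Claim_equal_solution : Prop := ∀ (n : Int), Dom_solution n → Spec_solution n (solution n)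

-- ===== LEMMAS AND PROOFS =====

-- sum of the odd numbers in [1, 2k] is k^2
lemma odd_filter_sum (k : Nat) :
    ((PySem.List.pyRange 1 (2 * (k : Int) + 1) 1).filter (fun i => PySem.Int.mod i 2 != 0)).sum
      = (k : Int) ^ 2 := by
  induction k with
  | zero => simp [PySem.List.pyRange_one_eq_nil]
  | succ m ih =>
      have h1 : (2 * ((m + 1 : Nat) : Int) + 1) = (2 * (m : Int) + 1) + 1 + 1 := by push_cast; ring
      have hm1 : PySem.Int.mod (2 * (m : Int) + 1) 2 = 1 := by
        rw [PySem.Int.mod_eq_emod_of_pos (by omega : (0:Int) < 2)]; omega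
      have hm2 : PySem.Int.mod (2 * (m : Int) + 1 + 1) 2 = 0 := by
        rw [PySem.Int.mod_eq_emod_of_pos (by omega : (0:Int) < 2)]; omega
      have e1 : ([2 * (m : Int) + 1].filter (fun i => PySem.Int.mod i 2 != 0)).sum
          = 2 * (m : Int) + 1 := by
        rw [List.filter_cons]; rw [hm1]; simp
      have e2 : ([2 * (m : Int) + 1 + 1].filter (fun i => PySem.Int.mod i 2 != 0)).sum
          = 0 := by
        rw [List.filter_cons]; rw [hm2]; simp
      rw [h1, PySem.List.pyRange_one_succ_right (by omega),
        PySem.List.pyRange_one_succ_right (by omega),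
        List.filter_append, List.filter_append, List.sum_append, List.sum_append,
        ih, e1, e2]
      push_cast; ring

-- three times the sum of the squares of the even numbers in [1, 2k]
lemma even_sq_sum (k : Nat) :
    (((PySem.List.pyRange 1 (2 * (k : Int) + 1) 1).filter (fun i => PySem.Int.mod i 2 == 0)).map
        (fun i => i ^ 2)).sum * 3
      = 2 * (k : Int) * ((k : Int) + 1) * (2 * (k : Int) + 1) := by
  induction k with
  | zero => simp [PySem.List.pyRange_one_eq_nil]
  | succ m ih =>
      have h1 : (2 * ((m + 1 : Nat) : Int) + 1) = (2 * (m : Int) + 1) + 1 + 1 := by push_cast; ring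
      have hm1 : PySem.Int.mod (2 * (m : Int) + 1) 2 = 1 := by
        rw [PySem.Int.mod_eq_emod_of_pos (by omega : (0:Int) < 2)]; omega
      have hm2 : PySem.Int.mod (2 * (m : Int) + 1 + 1) 2 = 0 := by
        rw [PySem.Int.mod_eq_emod_of_pos (by omega : (0:Int) < 2)]; omega
      have e1 : (([2 * (m : Int) + 1].filter (fun i => PySem.Int.mod i 2 == 0)).map
          (fun i => i ^ 2)).sum = 0 := by
        rw [List.filter_cons]; rw [hm1]; simp
      have e2 : (([2 * (m : Int) + 1 + 1].filter (fun i => PySem.Int.mod i 2 == 0)).map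
          (fun i => i ^ 2)).sum = (2 * (m : Int) + 2) ^ 2 := by
        rw [List.filter_cons]; rw [hm2]; simp; ring
      rw [h1, PySem.List.pyRange_one_succ_right (by omega),
        PySem.List.pyRange_one_succ_right (by omega),
        List.filter_append, List.filter_append, List.map_append, List.map_append,
        List.sum_append, List.sum_append, e1, e2, add_zero, add_mul, ih]
      push_cast; ring

lemma fdiv_three_cancel (s : Int) : PySem.Int.floordiv (3 * s) 3 = s := by
  rw [PySem.Int.floordiv_eq_ediv_of_pos (by omega : (0:Int) < 3)]
  omega

-- ===== VERDICT (by name: the statement is the Claim_ definition above) =====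
theorem solution_spec : Claim_equal_solution := by
  intro n _
  unfold Spec_solution solution solution_alt
  rcases le_or_gt n 0 with hle | hpos
  · have hr : PySem.List.pyRange 1 (n + 1) 1 = [] := PySem.List.pyRange_one_eq_nil (by omega)
    rw [hr, if_pos hle]
    split <;> simp
  · have hmod := PySem.Int.mod_eq_emod_of_pos (a := n) (by omega : (0:Int) < 2)
    rw [if_neg (by omega : ¬ n ≤ 0)]
    rcases Int.even_or_odd n with ⟨k, hk⟩ | ⟨k, hk⟩
    · have hm : PySem.Int.mod n 2 = 0 := by rw [hmod]; omega
      have hc : (PySem.Int.mod n 2 != 0) = false := by rw [hm]; rfl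
      rw [hc, if_neg (by simp), if_neg (by simp)]
      have hkn : n = 2 * ((k.toNat : Int)) := by omega
      rw [hkn]
      have hfd : PySem.Int.floordiv (2 * (k.toNat : Int)) 2 = (k.toNat : Int) := by
        rw [PySem.Int.floordiv_eq_ediv_of_pos (by omega : (0:Int) < 2)]; omega
      rw [hfd]
      show _ = PySem.Int.floordiv (2 * (k.toNat : Int) * ((k.toNat : Int) + 1)
          * (2 * (k.toNat : Int) + 1)) 3
      have h3 : 2 * (k.toNat : Int) * ((k.toNat : Int) + 1) * (2 * (k.toNat : Int) + 1)
          = 3 * ((((PySem.List.pyRange 1 (2 * (k.toNat : Int) + 1) 1).filter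
              (fun i => PySem.Int.mod i 2 == 0)).map (fun i => i ^ 2)).sum) := by
        rw [← even_sq_sum k.toNat]; ring
      rw [h3, fdiv_three_cancel]
    · have hm : PySem.Int.mod n 2 = 1 := by rw [hmod]; omega
      have hc : (PySem.Int.mod n 2 != 0) = true := by rw [hm]; rfl
      rw [hc, if_pos rfl, if_pos rfl]
      have hkn : n = 2 * (k.toNat : Int) + 1 := by omega
      rw [hkn]
      have hsplit : PySem.List.pyRange 1 (2 * (k.toNat : Int) + 1 + 1) 1
          = PySem.List.pyRange 1 (2 * (k.toNat : Int) + 1) 1 ++ [2 * (k.toNat : Int) + 1] :=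
        PySem.List.pyRange_one_succ_right (by omega)
      have hlast : PySem.Int.mod (2 * (k.toNat : Int) + 1) 2 = 1 := by
        rw [PySem.Int.mod_eq_emod_of_pos (by omega : (0:Int) < 2)]; omega
      have e1 : ([2 * (k.toNat : Int) + 1].filter (fun i => PySem.Int.mod i 2 != 0)).sum
          = 2 * (k.toNat : Int) + 1 := by rw [List.filter_cons]; rw [hlast]; simp
      have hfd : PySem.Int.floordiv (2 * (k.toNat : Int) + 1 + 1) 2 = (k.toNat : Int) + 1 := by
        rw [PySem.Int.floordiv_eq_ediv_of_pos (by omega : (0:Int) < 2)]; omega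
      show _ = PySem.Int.floordiv (2 * (k.toNat : Int) + 1 + 1) 2
          * PySem.Int.floordiv (2 * (k.toNat : Int) + 1 + 1) 2
      rw [hsplit, List.filter_append, List.sum_append, odd_filter_sum k.toNat, e1, hfd]
      ring
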